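-- pv_equiv track=rewrite | github.com/Ahmed23Adel/SimpleFile | reader.py | __is_sentence
-- ===== SOURCE A (Python) =====
-- from typing import Tuple
--
-- def __is_sentence(s: str) -> Tuple:
--     """
--     The end of a complete sentence should be marked by a period(.), a question mark(?) or an exclamation
--     point(!)
--     Args:
--         s (str): a sentence.
--     Returns:
--         bool: True if s is a sentence, False otherwise
--     """
--     if "." in s or "?" in s or "!" in s:
--         dot_index, ques_index, exec_index = s.find("."), s.find("?"), s.find("!")
--
--         is_valid = lambda x: True if x != -1 else False
--         indxs = [dot_index, ques_index, exec_index]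
--         indxs = [x for x in indxs if is_valid(x)]
--         final_index = min(indxs)
--         return True, final_index
--     return False, -1
-- ===== SOURCE B (Python) =====
-- def __is_sentence(s):
--     # Single early-returning left-to-right pass instead of three find() scans + filter + min.
--     i = 0
--     for c in s:
--         if c == '.' or c == '?' or c == '!':
--             return True, i
--         i += 1
--     return False, -1
-- ===== Notes on version B (the rewrite author's own statement) =====
-- stated objective: simpler
-- what changed: Replaced the three s.find scans plus filter-and-min with one early-terminating left-to-right pass that returns the first terminator's index directly.
import Mathlib
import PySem

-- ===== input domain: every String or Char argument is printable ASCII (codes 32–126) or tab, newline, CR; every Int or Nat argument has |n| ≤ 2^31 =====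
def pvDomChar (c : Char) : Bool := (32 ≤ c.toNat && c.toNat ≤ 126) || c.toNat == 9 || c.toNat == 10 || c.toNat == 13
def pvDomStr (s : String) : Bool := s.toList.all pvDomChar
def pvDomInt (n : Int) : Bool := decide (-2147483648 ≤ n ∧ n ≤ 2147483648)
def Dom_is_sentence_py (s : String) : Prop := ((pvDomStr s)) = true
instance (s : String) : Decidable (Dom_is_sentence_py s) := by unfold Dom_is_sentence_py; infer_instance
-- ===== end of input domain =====

-- B replaces A's three find() scans + filter + min with one early-returning pass (simpler decomposition).

-- ===== PORT A =====
def is_sentence_py (s : String) : Bool × Int :=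
  if PySem.Str.isIn "." s || PySem.Str.isIn "?" s || PySem.Str.isIn "!" s then
    let dot_index := PySem.Str.find s "."
    let ques_index := PySem.Str.find s "?"
    let exec_index := PySem.Str.find s "!"
    let indxs := [dot_index, ques_index, exec_index]
    let indxs2 := indxs.filter (fun x => decide (x ≠ -1))
    match PySem.List.min? indxs2 (fun x => x) with
    | some final_index => (true, final_index)
    | none => (true, 0)  -- unreachable: under the guard indxs2 is nonempty (Python's min would raise on [])
  else (false, -1)

-- ===== PORT B =====
def altGo : List Char → Int → Bool × Int
  | [], _ => (false, -1)
  | c :: rest, i => if c == '.' || c == '?' || c == '!' then (true, i) else altGo rest (i + 1)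

def is_sentence_py_alt (s : String) : Bool × Int := altGo s.toList 0

-- ===== PRECONDITION & SPEC =====
def Spec_is_sentence_py (s : String) (out : Bool × Int) : Prop := out = is_sentence_py_alt s
instance (s : String) (out : Bool × Int) : Decidable (Spec_is_sentence_py s out) := by unfold Spec_is_sentence_py; infer_instance

-- ===== CLAIM (what is proved, stated in full; the proofs are below) =====
def Claim_equal_is_sentence_py : Prop := ∀ (s : String), Dom_is_sentence_py s → Spec_is_sentence_py s (is_sentence_py s)

-- ===== LEMMAS AND PROOFS =====

def pTerm (c : Char) : Bool := c == '.' || c == '?' || c == '!'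

lemma altGo_eq (l : List Char) (i : Int) :
    altGo l i = if l.findIdx pTerm < l.length then (true, i + l.findIdx pTerm) else (false, -1) := by
  induction l generalizing i with
  | nil => simp [altGo]
  | cons c rest ih =>
    by_cases hc : (c == '.' || c == '?' || c == '!') = true
    · have hidx : List.findIdx pTerm (c :: rest) = 0 := by
        simp [List.findIdx_cons, pTerm, hc]
      simp [altGo, hc, hidx]
    · have hb : (c == '.' || c == '?' || c == '!') = false := by
        revert hc; cases (c == '.' || c == '?' || c == '!') <;> simp
      have hidx : List.findIdx pTerm (c :: rest) = List.findIdx pTerm rest + 1 := by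
        simp [List.findIdx_cons, pTerm, hb]
      simp only [altGo, hb, Bool.false_eq_true, if_false, ih, hidx, List.length_cons]
      split_ifs with h1 h2 h2
      · simp only [Prod.mk.injEq, true_and]; push_cast; ring
      · omega
      · omega
      · rfl

lemma singleton_infix {α : Type} (a : α) (l : List α) : [a] <:+: l ↔ a ∈ l := by
  constructor
  · intro h; exact h.mem (List.mem_singleton_self a)
  · intro h
    obtain ⟨t1, t2, rfl⟩ := List.append_of_mem h
    exact ⟨t1, t2, by simp⟩

lemma singleton_prefix_drop (l : List Char) (ch : Char) (i : Nat) :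
    [ch] <+: l.drop i ↔ l[i]? = some ch := by
  rw [← List.head?_drop]
  cases h : l.drop i with
  | nil => simp
  | cons x xs => simp [List.prefix_cons_iff, eq_comm]

-- first occurrence of ch in l, as found by Chars.find, is ≥ the first terminator position
lemma find_toNat_le (l : List Char) (ch : Char) (j : Nat)
    (hj : l[j]? = some ch) :
    0 ≤ PySem.Chars.find l [ch] ∧ (PySem.Chars.find l [ch]).toNat ≤ j := by
  have hmem : ch ∈ l := by
    have := List.getElem?_eq_some_iff.mp hj
    obtain ⟨h, rfl⟩ := this
    exact List.getElem_mem h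
  have hnn : 0 ≤ PySem.Chars.find l [ch] :=
    (PySem.Chars.find_nonneg_iff _ _).mpr ((singleton_infix ch l).mpr hmem)
  refine ⟨hnn, ?_⟩
  obtain ⟨_, hmin⟩ := PySem.Chars.find_spec hnn
  by_contra hlt
  exact hmin j (by omega) ((singleton_prefix_drop l ch j).mpr hj)

lemma find_points_at (l : List Char) (ch : Char) (h : 0 ≤ PySem.Chars.find l [ch]) :
    l[(PySem.Chars.find l [ch]).toNat]? = some ch := by
  obtain ⟨hpre, _⟩ := PySem.Chars.find_spec h
  exact (singleton_prefix_drop l ch _).mp hpre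

lemma main_eq (l : List Char) :
    (if PySem.Chars.isIn ['.'] l || PySem.Chars.isIn ['?'] l || PySem.Chars.isIn ['!'] l then
      match PySem.List.min?
        (([PySem.Chars.find l ['.'], PySem.Chars.find l ['?'], PySem.Chars.find l ['!']]).filter
          (fun x => decide (x ≠ -1))) (fun x => x) with
      | some final_index => ((true : Bool), final_index)
      | none => ((true : Bool), (0 : Int))
    else ((false : Bool), (-1 : Int))) = altGo l 0 := by
  set j := l.findIdx pTerm with hjdef
  by_cases hex : ∃ c ∈ l, pTerm c
  · -- a terminator exists
    have hjlt : j < l.length := by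
      obtain ⟨c, hc, hpc⟩ := hex
      exact List.findIdx_lt_length_of_exists ⟨c, hc, hpc⟩
    have hjget : pTerm (l[j]'hjlt) := List.findIdx_getElem (w := hjlt)
    have hjmin : ∀ i (h : i < j), pTerm (l[i]'(by omega)) = false := by
      intro i hi
      exact List.not_of_lt_findIdx hi
    -- the guard is true
    have hguard : (PySem.Chars.isIn ['.'] l || PySem.Chars.isIn ['?'] l
        || PySem.Chars.isIn ['!'] l) = true := by
      have hmem : l[j]'hjlt ∈ l := List.getElem_mem hjlt
      have hpc := hjget
      simp only [pTerm, Bool.or_eq_true, beq_iff_eq] at hpc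
      rcases hpc with (h | h) | h
      · have hd : '.' ∈ l := by rw [← h]; exact hmem
        simp [PySem.Chars.isIn_iff_infix, singleton_infix, hd]
      · have hd : '?' ∈ l := by rw [← h]; exact hmem
        simp [PySem.Chars.isIn_iff_infix, singleton_infix, hd]
      · have hd : '!' ∈ l := by rw [← h]; exact hmem
        simp [PySem.Chars.isIn_iff_infix, singleton_infix, hd]
    rw [hguard]
    -- the filtered list and its minimum
    set F := (([PySem.Chars.find l ['.'], PySem.Chars.find l ['?'],
        PySem.Chars.find l ['!']]).filter (fun x => decide (x ≠ -1)))
    have hjterm := hjget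
    simp only [pTerm, Bool.or_eq_true, beq_iff_eq] at hjterm
    have hkey : ∃ y ∈ F, y ≤ (j : Int) := by
      rcases hjterm with (h | h) | h
      · obtain ⟨hnn, hle⟩ := find_toNat_le l '.' j
          (List.getElem?_eq_some_iff.mpr ⟨hjlt, h⟩)
        refine ⟨PySem.Chars.find l ['.'], ?_, by omega⟩
        simp only [F, List.mem_filter, List.mem_cons]
        exact ⟨by simp, by simp; omega⟩
      · obtain ⟨hnn, hle⟩ := find_toNat_le l '?' j
          (List.getElem?_eq_some_iff.mpr ⟨hjlt, h⟩)
        refine ⟨PySem.Chars.find l ['?'], ?_, by omega⟩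
        simp only [F, List.mem_filter, List.mem_cons]
        exact ⟨by simp, by simp; omega⟩
      · obtain ⟨hnn, hle⟩ := find_toNat_le l '!' j
          (List.getElem?_eq_some_iff.mpr ⟨hjlt, h⟩)
        refine ⟨PySem.Chars.find l ['!'], ?_, by omega⟩
        simp only [F, List.mem_filter, List.mem_cons]
        exact ⟨by simp, by simp; omega⟩
    obtain ⟨y, hyF, hyle⟩ := hkey
    have hFne : F ≠ [] := by intro h; rw [h] at hyF; exact absurd hyF (List.not_mem_nil)
    obtain ⟨m, hm⟩ : ∃ m, PySem.List.min? F (fun x => x) = some m := by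
      cases h : PySem.List.min? F (fun x => x) with
      | none => exact absurd ((PySem.List.min?_eq_none_iff _ _).mp h) hFne
      | some m => exact ⟨m, rfl⟩
    have hmmem : m ∈ F := PySem.List.min?_mem hm
    have hmle : m ≤ y := PySem.List.min?_isMin hm y hyF
    -- every element of F points at a terminator, hence is ≥ j
    have hmge : (j : Int) ≤ m := by
      have hmne : m ≠ -1 := by
        have := List.mem_filter.mp hmmem
        simpa using this.2
      have : ∃ ch, pTerm ch ∧ m = PySem.Chars.find l [ch] := by
        have := (List.mem_filter.mp hmmem).1
        simp only [List.mem_cons, List.not_mem_nil, or_false] at this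
        rcases this with h | h | h
        · exact ⟨'.', by decide, h⟩
        · exact ⟨'?', by decide, h⟩
        · exact ⟨'!', by decide, h⟩
      obtain ⟨ch, hch', rfl⟩ := this
      have hnn : 0 ≤ PySem.Chars.find l [ch] := by
        have := PySem.Chars.neg_one_le_find l [ch]
        omega
      have hpt := find_points_at l ch hnn
      have hlt : (PySem.Chars.find l [ch]).toNat < l.length :=
        (List.getElem?_eq_some_iff.mp hpt).1
      have heq : l[(PySem.Chars.find l [ch]).toNat]'hlt = ch :=
        (List.getElem?_eq_some_iff.mp hpt).2
      by_contra hlt'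
      have hltj : (PySem.Chars.find l [ch]).toNat < j := by omega
      have hf := hjmin _ hltj
      rw [heq, hch'] at hf
      simp at hf
    have hmj : m = (j : Int) := by omega
    rw [hm, altGo_eq, ← hjdef, if_pos hjlt]
    simp [hmj]
  · -- no terminator
    have hguard : (PySem.Chars.isIn ['.'] l || PySem.Chars.isIn ['?'] l
        || PySem.Chars.isIn ['!'] l) = false := by
      push Not at hex
      have h1 : '.' ∉ l := fun h => by simpa [pTerm] using hex '.' h
      have h2 : '?' ∉ l := fun h => by simpa [pTerm] using hex '?' h
      have h3 : '!' ∉ l := fun h => by simpa [pTerm] using hex '!' h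
      simp [PySem.Chars.isIn_eq_false_iff, singleton_infix, h1, h2, h3]
    rw [hguard]
    have hj : ¬ l.findIdx pTerm < l.length := by
      intro h
      exact hex ⟨l[l.findIdx pTerm]'h, List.getElem_mem h, List.findIdx_getElem (w := h)⟩
    rw [altGo_eq]
    simp [hj]

-- ===== VERDICT (by name: the statement is the Claim_ definition above) =====
theorem is_sentence_py_spec : Claim_equal_is_sentence_py := by
  intro s _
  show is_sentence_py s = is_sentence_py_alt s
  unfold is_sentence_py is_sentence_py_alt
  have h1 : PySem.Str.isIn "." s = PySem.Chars.isIn ['.'] s.toList := by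
    simp [PySem.Str.isIn_eq]
  have h2 : PySem.Str.isIn "?" s = PySem.Chars.isIn ['?'] s.toList := by
    simp [PySem.Str.isIn_eq]
  have h3 : PySem.Str.isIn "!" s = PySem.Chars.isIn ['!'] s.toList := by
    simp [PySem.Str.isIn_eq]
  have f1 : PySem.Str.find s "." = PySem.Chars.find s.toList ['.'] := by
    simp [PySem.Str.find_eq]
  have f2 : PySem.Str.find s "?" = PySem.Chars.find s.toList ['?'] := by
    simp [PySem.Str.find_eq]
  have f3 : PySem.Str.find s "!" = PySem.Chars.find s.toList ['!'] := by
    simp [PySem.Str.find_eq]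
  simp only [h1, h2, h3, f1, f2, f3]
  exact main_eq s.toList
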